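-- pv_equiv track=rewrite | github.com/DongjinS/Algorithm_study | programmers/mock_test.py | solution
-- ===== SOURCE A (Python) =====
-- def solution(answers):
--     from collections import deque
--     supo1 = [1,2,3,4,5]
--     supo2 = [2,1,2,3,2,4,2,5]
--     supo3 = [3,3,1,1,2,2,4,4,5,5]
--     score = [0,0,0]
--
--     supo1 = deque(supo1)
--     supo2 = deque(supo2)
--     supo3 = deque(supo3)
--     answers = deque(answers)
--
--     while answers:
--         ans = answers.popleft()
--         tmp = []
--         tmp.append(supo1.popleft())
--         tmp.append(supo2.popleft())
--         tmp.append(supo3.popleft())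
--         for i in range(3):
--             if tmp[i] == ans:
--                 score[i] += 1
--             if i == 0:
--                 supo1.append(tmp[i])
--             elif i == 1:
--                 supo2.append(tmp[i])
--             else:
--                 supo3.append(tmp[i])
--
--     top_scorerer = []
--     max_score = max(score)
--     for i in range(len(score)):
--         if score[i] == max_score:
--                 top_scorerer.append(i+1)
--
--     return top_scorerer
-- ===== SOURCE B (Python) =====
-- def solution(answers):
--     patterns = [[1, 2, 3, 4, 5],
--                 [2, 1, 2, 3, 2, 4, 2, 5],
--                 [3, 3, 1, 1, 2, 2, 4, 4, 5, 5]]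
--     score = [sum(p[i % len(p)] == a for i, a in enumerate(answers)) for p in patterns]
--     m = max(score)
--     return [k + 1 for k in range(3) if score[k] == m]
-- ===== Notes on version B (the rewrite author's own statement) =====
-- stated objective: idiomatic
-- what changed: Replaces the single interleaved pass that rotates three deques with three independent modulo-indexed passes (one per answer pattern) and comprehension-based selection of the winners.
import Mathlib
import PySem

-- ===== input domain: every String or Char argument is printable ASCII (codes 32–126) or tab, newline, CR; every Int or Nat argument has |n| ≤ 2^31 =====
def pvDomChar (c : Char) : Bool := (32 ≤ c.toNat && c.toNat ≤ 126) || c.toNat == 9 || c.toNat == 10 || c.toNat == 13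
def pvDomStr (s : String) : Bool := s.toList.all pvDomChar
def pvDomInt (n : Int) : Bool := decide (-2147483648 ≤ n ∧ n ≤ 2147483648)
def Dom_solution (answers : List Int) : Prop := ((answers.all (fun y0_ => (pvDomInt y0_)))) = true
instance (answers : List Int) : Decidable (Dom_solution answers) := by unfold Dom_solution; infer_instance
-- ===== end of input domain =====

-- B replaces A's single interleaved pass over three rotating deques by three
-- independent modulo-indexed passes (idiomatic decomposition; same O(n) cost).


-- ===== PORT A =====
-- the while loop: pop an answer, pop the front of each deque, compare, push it back
def solutionLoop : List Int → List Int → List Int → List Int → Int × Int × Int → Int × Int × Int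
  | [], _, _, _, score => score
  | ans :: rest, q1, q2, q3, (s1, s2, s3) =>
    let t1 := q1.headI
    let t2 := q2.headI
    let t3 := q3.headI
    let s1 := if t1 == ans then s1 + 1 else s1
    let s2 := if t2 == ans then s2 + 1 else s2
    let s3 := if t3 == ans then s3 + 1 else s3
    solutionLoop rest (q1.tail ++ [t1]) (q2.tail ++ [t2]) (q3.tail ++ [t3]) (s1, s2, s3)

def solution (answers : List Int) : List Int :=
  let supo1 : List Int := [1, 2, 3, 4, 5]
  let supo2 : List Int := [2, 1, 2, 3, 2, 4, 2, 5]
  let supo3 : List Int := [3, 3, 1, 1, 2, 2, 4, 4, 5, 5]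
  let score := solutionLoop answers supo1 supo2 supo3 (0, 0, 0)
  let maxScore := max (max score.1 score.2.1) score.2.2
  ((if score.1 == maxScore then [(1 : Int)] else []) ++
    (if score.2.1 == maxScore then [(2 : Int)] else []) ++
    (if score.2.2 == maxScore then [(3 : Int)] else []))

-- ===== PORT B =====
-- sum(p[i % len(p)] == a for i, a in enumerate(answers)), index i carried explicitly
def countMod (p : List Int) : Nat → List Int → Int
  | _, [] => 0
  | i, a :: rest => (if p[i % p.length]? == some a then 1 else 0) + countMod p (i + 1) rest

def solution_alt (answers : List Int) : List Int :=
  let patterns : List (List Int) :=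
    [[1, 2, 3, 4, 5], [2, 1, 2, 3, 2, 4, 2, 5], [3, 3, 1, 1, 2, 2, 4, 4, 5, 5]]
  let score := patterns.map (fun p => countMod p 0 answers)
  let m := score.max?.getD 0
  (List.range 3).filterMap (fun (k : Nat) => if score[k]? == some m then some ((k : Int) + 1) else none)

-- ===== PRECONDITION & SPEC =====
def Spec_solution (answers : List Int) (out : List Int) : Prop := out = solution_alt answers
instance (answers : List Int) (out : List Int) : Decidable (Spec_solution answers out) := by unfold Spec_solution; infer_instance

-- ===== CLAIM (what is proved, stated in full; the proofs are below) =====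
def Claim_equal_solution : Prop := ∀ (answers : List Int), Dom_solution answers → Spec_solution answers (solution answers)

-- ===== LEMMAS AND PROOFS =====

theorem rotate_one_eq (p : List Int) (hp : p ≠ []) :
    p.rotate 1 = p.tail ++ [p.headI] := by
  cases p with
  | nil => exact absurd rfl hp
  | cons a l => simp [List.rotate_cons_succ]

theorem headI_rotate (p : List Int) (hp : p ≠ []) (i : Nat) :
    (p.rotate i).headI = p[i % p.length]'(Nat.mod_lt _ (List.length_pos_iff.mpr hp)) := by
  have hlen : 0 < (p.rotate i).length := by
    rw [List.length_rotate]; exact List.length_pos_iff.mpr hp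
  have h0 := List.getElem_rotate p i 0 hlen
  obtain ⟨x, xs, hx⟩ := List.exists_cons_of_ne_nil (List.length_pos_iff.mp hlen)
  simp only [hx, List.getElem_cons_zero, Nat.zero_add] at h0
  rw [hx, List.headI_cons, h0]

theorem tail_rotate_step (p : List Int) (hp : p ≠ []) (i : Nat) :
    (p.rotate i).tail ++ [(p.rotate i).headI] = p.rotate (i + 1) := by
  have hr : p.rotate i ≠ [] := by
    intro h
    apply hp
    simpa [List.length_rotate, List.length_eq_zero_iff] using congrArg List.length h
  rw [← rotate_one_eq _ hr, List.rotate_rotate]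

theorem getElem?_of_lt (p : List Int) (i : Nat) (h : i % p.length < p.length) :
    p[i % p.length]? = some (p[i % p.length]'h) := List.getElem?_eq_getElem h

theorem loop_eq (p1 p2 p3 : List Int) (h1 : p1 ≠ []) (h2 : p2 ≠ []) (h3 : p3 ≠ [])
    (ans : List Int) : ∀ (i : Nat) (s1 s2 s3 : Int),
    solutionLoop ans (p1.rotate i) (p2.rotate i) (p3.rotate i) (s1, s2, s3)
      = (s1 + countMod p1 i ans, s2 + countMod p2 i ans, s3 + countMod p3 i ans) := by
  induction ans with
  | nil => intro i s1 s2 s3; simp [solutionLoop, countMod]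
  | cons a rest ih =>
    intro i s1 s2 s3
    have e1 := headI_rotate p1 h1 i
    have e2 := headI_rotate p2 h2 i
    have e3 := headI_rotate p3 h3 i
    rw [solutionLoop]
    rw [tail_rotate_step p1 h1 i, tail_rotate_step p2 h2 i, tail_rotate_step p3 h3 i, ih]
    rw [countMod, countMod, countMod]
    rw [e1, e2, e3,
      getElem?_of_lt p1 i (Nat.mod_lt _ (List.length_pos_iff.mpr h1)),
      getElem?_of_lt p2 i (Nat.mod_lt _ (List.length_pos_iff.mpr h2)),
      getElem?_of_lt p3 i (Nat.mod_lt _ (List.length_pos_iff.mpr h3))]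
    by_cases c1 : p1[i % p1.length]'(Nat.mod_lt _ (List.length_pos_iff.mpr h1)) = a <;>
      by_cases c2 : p2[i % p2.length]'(Nat.mod_lt _ (List.length_pos_iff.mpr h2)) = a <;>
        by_cases c3 : p3[i % p3.length]'(Nat.mod_lt _ (List.length_pos_iff.mpr h3)) = a <;>
          simp [c1, c2, c3] <;> ring_nf <;> simp

theorem final_eq (s1 s2 s3 : Int) :
    ((if s1 == max (max s1 s2) s3 then [(1 : Int)] else []) ++
      (if s2 == max (max s1 s2) s3 then [(2 : Int)] else []) ++
      (if s3 == max (max s1 s2) s3 then [(3 : Int)] else []))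
    = (List.range 3).filterMap
        (fun (k : Nat) => if [s1, s2, s3][k]? == some (([s1, s2, s3] : List Int).max?.getD 0)
          then some ((k : Int) + 1) else none) := by
  have hm : ([s1, s2, s3] : List Int).max?.getD 0 = max (max s1 s2) s3 := by
    simp [List.max?, List.foldl]
  rw [hm]
  simp only [List.range_succ, List.range_zero, List.nil_append, List.filterMap_append,
    List.filterMap_cons, List.filterMap_nil, List.getElem?_cons_zero, List.getElem?_cons_succ,
    beq_iff_eq, Option.some.injEq]
  split_ifs <;> norm_num

-- ===== VERDICT (by name: the statement is the Claim_ definition above) =====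
theorem solution_spec : Claim_equal_solution := by
  intro answers _
  unfold Spec_solution
  have h := loop_eq [1, 2, 3, 4, 5] [2, 1, 2, 3, 2, 4, 2, 5] [3, 3, 1, 1, 2, 2, 4, 4, 5, 5]
    (by decide) (by decide) (by decide) answers 0 0 0 0
  simp only [List.rotate_zero] at h
  simp only [solution, solution_alt, h, zero_add, List.map_cons, List.map_nil]
  exact final_eq _ _ _
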